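-- pv_equiv track=rewrite | github.com/Otiz-beginner/SieveingNet | tcb_code_original/TCB_my.py | TCB2Bin
-- ===== SOURCE A (Python) =====
-- def TCB2Bin(T):
--     B=0
--     L = len(T)
--     for i in range(L):
--         if T[i] == '0':
--             t = 0
--         elif T[i] == '+':
--             t = 1
--         else:
--             t = -1
--         B += t * (1 << (L-1-i))
--     return(B)
-- ===== SOURCE B (Python) =====
-- def TCB2Bin(T):
--     B = 0
--     for c in T:
--         if c == '0':
--             t = 0
--         elif c == '+':
--             t = 1
--         else:
--             t = -1
--         B = 2 * B + t
--     return B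
-- ===== Notes on version B (the rewrite author's own statement) =====
-- stated objective: faster
-- what changed: Replaces the sum of independent positional terms t*(1<<(L-1-i)) with a single left-to-right Horner fold B=2*B+t, removing all index and shift computation.
import Mathlib
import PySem

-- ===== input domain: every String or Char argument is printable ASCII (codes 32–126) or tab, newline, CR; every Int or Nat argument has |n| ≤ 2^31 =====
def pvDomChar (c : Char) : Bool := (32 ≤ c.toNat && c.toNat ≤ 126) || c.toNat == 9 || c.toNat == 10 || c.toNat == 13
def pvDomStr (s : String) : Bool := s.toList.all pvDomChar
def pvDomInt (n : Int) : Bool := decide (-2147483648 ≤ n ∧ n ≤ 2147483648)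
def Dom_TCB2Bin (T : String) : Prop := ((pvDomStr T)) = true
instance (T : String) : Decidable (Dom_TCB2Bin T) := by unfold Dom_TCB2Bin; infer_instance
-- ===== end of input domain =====

-- B replaces A's positional sum t*(1 << (L-1-i)) with a single Horner fold B = 2*B + t (idiomatic).

-- ===== PORT A =====
-- digit of a character, same branch order as A's if/elif/else
def pvTern (c : Char) : Int := if c = '0' then 0 else if c = '+' then 1 else -1

def TCB2Bin (T : String) : Int :=
  let cs := T.toList
  let L := cs.length
  (List.range L).foldl (fun B i => B + pvTern (cs.getD i ' ') * 2 ^ (L - 1 - i)) 0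

-- ===== PORT B =====
def TCB2Bin_alt (T : String) : Int :=
  T.toList.foldl (fun B c => 2 * B + pvTern c) 0

-- ===== PRECONDITION & SPEC =====
def Spec_TCB2Bin (T : String) (out : Int) : Prop := out = TCB2Bin_alt T
instance (T : String) (out : Int) : Decidable (Spec_TCB2Bin T out) := by unfold Spec_TCB2Bin; infer_instance

-- ===== CLAIM (what is proved, stated in full; the proofs are below) =====
def Claim_equal_TCB2Bin : Prop := ∀ (T : String), Dom_TCB2Bin T → Spec_TCB2Bin T (TCB2Bin T)

-- ===== LEMMAS AND PROOFS =====

-- pulling the initial accumulator out of an additive fold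
theorem pv_foldl_add_init (l : List Nat) (f : Nat → Int) (b : Int) :
    l.foldl (fun B i => B + f i) b = b + l.foldl (fun B i => B + f i) 0 := by
  induction l generalizing b with
  | nil => simp
  | cons x xs ih =>
    simp only [List.foldl_cons]
    rw [ih, ih (0 + f x)]
    ring

-- pulling the initial accumulator out of a Horner fold
theorem pv_horner_init (cs : List Char) (b : Int) :
    cs.foldl (fun B c => 2 * B + pvTern c) b
      = b * 2 ^ cs.length + cs.foldl (fun B c => 2 * B + pvTern c) 0 := by
  induction cs generalizing b with
  | nil => simp
  | cons c cs ih =>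
    simp only [List.foldl_cons, List.length_cons]
    rw [ih, ih (2 * 0 + pvTern c)]
    ring

theorem pv_A_eq_horner (cs : List Char) :
    (List.range cs.length).foldl
        (fun B i => B + pvTern (cs.getD i ' ') * 2 ^ (cs.length - 1 - i)) 0
      = cs.foldl (fun B c => 2 * B + pvTern c) 0 := by
  induction cs with
  | nil => simp
  | cons c cs ih =>
    simp only [List.length_cons]
    rw [List.range_succ_eq_map, List.foldl_cons, List.foldl_map]
    have h1 : ∀ i, (c :: cs).getD (i + 1) ' ' = cs.getD i ' ' := by intro i; rfl
    have h2 : ∀ i, cs.length + 1 - 1 - (i + 1) = cs.length - 1 - i := by intro i; omega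
    have h3 : cs.length + 1 - 1 - 0 = cs.length := by omega
    simp only [Nat.succ_eq_add_one, h1, h2, h3]
    rw [pv_foldl_add_init, ih, List.foldl_cons, pv_horner_init cs (2 * 0 + pvTern c)]
    simp only [List.getD_cons_zero]
    ring

-- ===== VERDICT (by name: the statement is the Claim_ definition above) =====
theorem TCB2Bin_spec : Claim_equal_TCB2Bin := by
  intro T _
  show TCB2Bin T = TCB2Bin_alt T
  unfold TCB2Bin TCB2Bin_alt
  exact pv_A_eq_horner T.toList
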